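-- pv_equiv track=rewrite | github.com/Antoo22D/Exercisce_Python_UNIVERSITY | E3.py | sottoseq
-- ===== SOURCE A (Python) =====
-- def sottoseq(lista1):
--     vTemp=0
--     sotss=[]
--     for i in range(len(lista1)):
--         if i==len(lista1)-1:
--             sotss.append(lista1[i])
--             if len(sotss)>=2:
--                     vTemp+=1
--         else:
--             if int(lista1[i])+1==int(lista1[i+1]):
--                 sotss.append(lista1[i])
--             else:
--                 sotss.append(lista1[i])
--                 if len(sotss)>=2:
--                     vTemp+=1
--                 sotss=[]
--     return vTemp
-- ===== SOURCE B (Python) =====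
-- def sottoseq(lista1):
--     # Two-pass: derive adjacency flags, then count rising edges (run starts).
--     flags = [int(lista1[i]) + 1 == int(lista1[i + 1]) for i in range(len(lista1) - 1)]
--     count = 0
--     prev = False
--     for f in flags:
--         if f and not prev:
--             count += 1
--         prev = f
--     return count
-- ===== Notes on version B (the rewrite author's own statement) =====
-- stated objective: alternative
-- what changed: Replaces A's single stateful pass that accumulates the current run in a list and counts when a run ends (plus a duplicated last-element branch) by two passes: build a boolean adjacency-flag array, then count rising edges (run starts) over it with no run buffer and no special last-index case.
import Mathlib
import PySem

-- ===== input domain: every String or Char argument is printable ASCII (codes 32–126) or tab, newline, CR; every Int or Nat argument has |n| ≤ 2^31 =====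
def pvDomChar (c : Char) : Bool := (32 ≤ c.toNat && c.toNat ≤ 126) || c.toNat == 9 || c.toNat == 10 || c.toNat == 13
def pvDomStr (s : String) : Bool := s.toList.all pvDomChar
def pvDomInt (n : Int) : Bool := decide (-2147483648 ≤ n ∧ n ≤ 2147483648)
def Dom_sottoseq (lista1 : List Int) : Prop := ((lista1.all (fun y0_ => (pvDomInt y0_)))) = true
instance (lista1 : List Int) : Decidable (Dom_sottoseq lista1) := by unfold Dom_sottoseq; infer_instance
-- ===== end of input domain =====

-- B counts maximal +1-runs by their starts (rising edges of an adjacency-flag array)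
-- instead of A's single pass that buffers the current run and counts at run ends.

-- ===== PORT A =====
-- A's loop body: state is (vTemp, sotss); indices produced by range(len) are always
-- in range, so lista1[i] is ported as getD i 0 (exact on these indices).
def sottoseqStep (lista1 : List Int) (st : Int × List Int) (i : Nat) : Int × List Int :=
  if i == lista1.length - 1 then
    let s := st.2 ++ [lista1.getD i 0]
    (if 2 ≤ s.length then st.1 + 1 else st.1, s)
  else
    if lista1.getD i 0 + 1 == lista1.getD (i + 1) 0 then
      (st.1, st.2 ++ [lista1.getD i 0])
    else
      let s := st.2 ++ [lista1.getD i 0]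
      (if 2 ≤ s.length then st.1 + 1 else st.1, [])

def sottoseq (lista1 : List Int) : Int :=
  ((List.range lista1.length).foldl (sottoseqStep lista1) (0, [])).1

-- ===== PORT B =====
def sottoseqFlags (lista1 : List Int) : List Bool :=
  (List.range (lista1.length - 1)).map
    (fun i => lista1.getD i 0 + 1 == lista1.getD (i + 1) 0)

def sottoseqEdges (flags : List Bool) : Int :=
  (flags.foldl (fun (st : Int × Bool) f =>
    (if f && !st.2 then st.1 + 1 else st.1, f)) (0, false)).1

def sottoseq_alt (lista1 : List Int) : Int :=
  sottoseqEdges (sottoseqFlags lista1)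

-- ===== PRECONDITION & SPEC =====
def Spec_sottoseq (lista1 : List Int) (out : Int) : Prop := out = sottoseq_alt lista1
instance (lista1 : List Int) (out : Int) : Decidable (Spec_sottoseq lista1 out) := by unfold Spec_sottoseq; infer_instance

-- ===== CLAIM (what is proved, stated in full; the proofs are below) =====
def Claim_equal_sottoseq : Prop := ∀ (lista1 : List Int), Dom_sottoseq lista1 → Spec_sottoseq lista1 (sottoseq lista1)

-- ===== LEMMAS AND PROOFS =====

-- relation between A's state (vTemp, sotss) and B's state (count, prev)
def sottoseqRel (a : Int × List Int) (b : Int × Bool) : Prop :=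
  if b.2 then a.1 = b.1 - 1 ∧ 1 ≤ a.2.length else a.1 = b.1 ∧ a.2 = []

lemma sottoseq_inv (lista1 : List Int) (m : Nat) (hm : m ≤ lista1.length - 1) :
    sottoseqRel
      ((List.range m).foldl (sottoseqStep lista1) (0, []))
      (((List.range m).map
          (fun i => lista1.getD i 0 + 1 == lista1.getD (i + 1) 0)).foldl
        (fun (st : Int × Bool) f => (if f && !st.2 then st.1 + 1 else st.1, f)) (0, false)) := by
  induction m with
  | zero => simp [sottoseqRel]
  | succ k ih =>
    have hk : k ≤ lista1.length - 1 := Nat.le_of_succ_le hm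
    have hklt : k < lista1.length - 1 := hm
    have hne : (k == lista1.length - 1) = false := by
      simp [Nat.ne_of_lt hklt]
    have ih' := ih hk
    rw [List.range_succ, List.map_append, List.foldl_append, List.foldl_append]
    set a := (List.range k).foldl (sottoseqStep lista1) (0, []) with ha
    set b := ((List.range k).map
          (fun i => lista1.getD i 0 + 1 == lista1.getD (i + 1) 0)).foldl
        (fun (st : Int × Bool) f => (if f && !st.2 then st.1 + 1 else st.1, f)) (0, false) with hb
    simp only [List.foldl_cons, List.foldl_nil, List.map_cons, List.map_nil]
    unfold sottoseqStep
    rw [hne]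
    simp only [Bool.false_eq_true, if_false]
    by_cases hf : (lista1.getD k 0 + 1 == lista1.getD (k + 1) 0) = true
    · -- flag true: A buffers, B counts a rising edge if prev was false
      rw [hf]
      cases hp : b.2 with
      | true =>
        simp only [sottoseqRel, hp] at ih'
        simp [sottoseqRel, ih'.1]
      | false =>
        simp only [sottoseqRel, hp] at ih'
        simp [sottoseqRel, ih'.1]
    · -- flag false: run ends; A counts iff buffer had ≥1 element, B resets prev
      rw [Bool.not_eq_true] at hf
      rw [hf]
      cases hp : b.2 with
      | true =>
        simp only [sottoseqRel, hp] at ih'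
        obtain ⟨h1, hlen⟩ := ih'
        have hne : a.2 ≠ [] := by
          intro h; rw [h] at hlen; simp at hlen
        simp [sottoseqRel, hne, h1]
      | false =>
        simp only [sottoseqRel, hp] at ih'
        simp [sottoseqRel, ih'.2, ih'.1]

lemma sottoseq_eq_alt (lista1 : List Int) : sottoseq lista1 = sottoseq_alt lista1 := by
  cases hl : lista1.length with
  | zero =>
    unfold sottoseq sottoseq_alt sottoseqFlags sottoseqEdges
    rw [hl]
    simp
  | succ n =>
    have hn : lista1.length - 1 = n := by omega
    have hinv := sottoseq_inv lista1 n (by omega)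
    unfold sottoseq sottoseq_alt sottoseqFlags sottoseqEdges
    rw [hn, hl, List.range_succ, List.foldl_append]
    set a := (List.range n).foldl (sottoseqStep lista1) (0, []) with ha
    set b := ((List.range n).map
          (fun i => lista1.getD i 0 + 1 == lista1.getD (i + 1) 0)).foldl
        (fun (st : Int × Bool) f => (if f && !st.2 then st.1 + 1 else st.1, f)) (0, false) with hb
    simp only [List.foldl_cons, List.foldl_nil]
    unfold sottoseqStep
    rw [hn]
    simp only [beq_self_eq_true, if_true]
    cases hp : b.2 with
    | true =>
      simp only [sottoseqRel, hp] at hinv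
      obtain ⟨h1, hlen⟩ := hinv
      have hne : a.2 ≠ [] := by
        intro h; rw [h] at hlen; simp at hlen
      simp [hne, h1]
    | false =>
      simp only [sottoseqRel, hp] at hinv
      simp [hinv.2, hinv.1]

-- ===== VERDICT (by name: the statement is the Claim_ definition above) =====
theorem sottoseq_spec : Claim_equal_sottoseq := by
  intro l _
  unfold Spec_sottoseq
  exact sottoseq_eq_alt l
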